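-- pv_equiv track=rewrite | github.com/sivani182/recursions | glady_2.py | solve
-- ===== SOURCE A (Python) =====
-- def solve(Q, pairs, N, A):
--     count = 0
--     for i in range(N):
--         for j in range(i+1, N):
--             found = False
--             for k in range(Q):
--                 if ((A[i] == pairs[k][0] and A[j] == pairs[k][1]) or
--                     (A[i] == pairs[k][1] and A[j] == pairs[k][0])):
--                     found = True
--                     break
--             if found:
--                 count += 1
--     return count
-- ===== SOURCE B (Python) =====
-- def solve(Q, pairs, N, A):
--     n = N if N > 0 else 0
--     q = Q if Q > 0 else 0
--     if n < 2 or q == 0: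
--         return 0
--     vals = A[:n]
--     cnt = {}
--     for v in vals:
--         cnt[v] = cnt.get(v, 0) + 1
--     seen = set()
--     total = 0
--     for p in pairs[:q]:
--         x = p[0]
--         y = p[1]
--         key = (x, y) if x <= y else (y, x)
--         if key not in seen:
--             seen.add(key)
--             if x == y:
--                 c = cnt.get(x, 0)
--                 total += c * (c - 1) // 2
--             else:
--                 total += cnt.get(x, 0) * cnt.get(y, 0)
--     return total
-- ===== Notes on version B (the rewrite author's own statement) =====
-- stated objective: faster
-- what changed: Replaces the triple nested loop (all index pairs, each rescanning all Q query pairs) by a value-frequency dictionary built in one pass over A plus one deduplicating pass over the query pairs, adding cnt[x]*cnt[y] (or c*(c-1)//2 when x==y) per distinct unordered value pair; intended as faster (O(N+Q) vs O(N^2*Q)) — a timing run measured 72.56x at n=256 but could not confirm at larger sizes where A did not finish.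
-- outside the precondition, e.g. on solve(2, [[1, 2], [5]], 2, [1, 2]): A returns 1, B raises IndexError
import Mathlib
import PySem

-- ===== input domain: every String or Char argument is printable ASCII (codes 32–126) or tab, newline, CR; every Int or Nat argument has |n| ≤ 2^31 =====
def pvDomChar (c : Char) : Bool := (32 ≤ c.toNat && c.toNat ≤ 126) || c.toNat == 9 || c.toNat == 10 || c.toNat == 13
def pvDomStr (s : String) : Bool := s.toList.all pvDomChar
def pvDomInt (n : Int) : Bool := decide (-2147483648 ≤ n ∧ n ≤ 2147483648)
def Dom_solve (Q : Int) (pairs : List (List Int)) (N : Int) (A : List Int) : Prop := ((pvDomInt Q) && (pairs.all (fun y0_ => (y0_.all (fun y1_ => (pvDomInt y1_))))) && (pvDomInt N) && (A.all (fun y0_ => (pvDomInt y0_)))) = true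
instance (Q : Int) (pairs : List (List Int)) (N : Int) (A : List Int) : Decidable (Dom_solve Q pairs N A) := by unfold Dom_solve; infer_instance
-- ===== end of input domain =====

-- B replaces A's triple nested loop by a value-frequency dictionary over A[:N] and a single
-- deduplicating pass over the query pairs (one pass each over A and pairs instead of rescanning
-- all Q pairs for every index pair; intended as faster — a timing run measured 72.56x at
-- n=256 but could not confirm at larger sizes, where A did not finish).

-- ===== PORT A =====
def solve (Q : Int) (pairs : List (List Int)) (N : Int) (A : List Int) : Int :=
  (PySem.List.pyRange 0 N 1).foldl (fun count i =>
    (PySem.List.pyRange (i + 1) N 1).foldl (fun count j =>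
      -- 'found = False; for k …: if match: found = True; break' then 'if found:' is List.any
      if (PySem.List.pyRange 0 Q 1).any (fun k =>
           let pk := PySem.List.pyGetD pairs k []
           (PySem.List.pyGetD A i 0 == PySem.List.pyGetD pk 0 0 &&
            PySem.List.pyGetD A j 0 == PySem.List.pyGetD pk 1 0) ||
           (PySem.List.pyGetD A i 0 == PySem.List.pyGetD pk 1 0 &&
            PySem.List.pyGetD A j 0 == PySem.List.pyGetD pk 0 0))
      then count + 1 else count) count) 0

-- ===== PORT B =====
def solve_alt (Q : Int) (pairs : List (List Int)) (N : Int) (A : List Int) : Int :=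
  let n : Int := if N > 0 then N else 0
  let q : Int := if Q > 0 then Q else 0
  if n < 2 || q == 0 then 0 else
  let vals := PySem.List.slice A none (some n)
  let cnt : PySem.Dict Int Int :=
    vals.foldl (fun d v => d.insert v (d.getD v 0 + 1)) PySem.Dict.empty
  let st :=
    (PySem.List.slice pairs none (some q)).foldl
      (fun (st : PySem.Set (Int × Int) × Int) p =>
        let x := PySem.List.pyGetD p 0 0
        let y := PySem.List.pyGetD p 1 0
        let key := if x ≤ y then (x, y) else (y, x)
        if PySem.Set.contains st.1 key then st
        else (PySem.Set.add st.1 key,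
              st.2 + (if x = y then
                        let c := cnt.getD x 0
                        PySem.Int.floordiv (c * (c - 1)) 2
                      else cnt.getD x 0 * cnt.getD y 0)))
      (PySem.Set.empty, 0)
  st.2

-- ===== PRECONDITION & SPEC =====
-- Pre_ excludes exactly the inputs where the Python A hits an IndexError (N beyond len(A),
-- Q beyond len(pairs), or a query pair of length < 2 among the first Q); it mildly over-excludes
-- inputs where such a bad access is never reached only because every inner scan happens to break
-- earlier — A then returns by accident of the break order, and B raises IndexError there.
def Pre_solve (Q : Int) (pairs : List (List Int)) (N : Int) (A : List Int) : Prop :=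
  (2 ≤ N ∧ 1 ≤ Q) →
    (N ≤ (A.length : Int) ∧ Q ≤ (pairs.length : Int) ∧ ∀ p ∈ pairs.take Q.toNat, 2 ≤ p.length)
instance (Q : Int) (pairs : List (List Int)) (N : Int) (A : List Int) : Decidable (Pre_solve Q pairs N A) := by unfold Pre_solve; infer_instance

def pvWitness_solve : Int × List (List Int) × Int × List Int := (1, [[1, 2]], 2, [1, 2])

def Spec_solve (Q : Int) (pairs : List (List Int)) (N : Int) (A : List Int) (out : Int) : Prop := out = solve_alt Q pairs N A
instance (Q : Int) (pairs : List (List Int)) (N : Int) (A : List Int) (out : Int) : Decidable (Spec_solve Q pairs N A out) := by unfold Spec_solve; infer_instance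

-- ===== CLAIM (what is proved, stated in full; the proofs are below) =====
def Claim_equal_solve : Prop := ∀ (Q : Int) (pairs : List (List Int)) (N : Int) (A : List Int), Dom_solve Q pairs N A → Pre_solve Q pairs N A → Spec_solve Q pairs N A (solve Q pairs N A)

-- ===== LEMMAS AND PROOFS =====

def nrm (x y : Int) : Int × Int := if x ≤ y then (x, y) else (y, x)
def wt (vals : List Int) (k : Int × Int) : Int :=
  if k.1 = k.2 then PySem.Int.floordiv ((vals.count k.1 : Int) * ((vals.count k.1 : Int) - 1)) 2
  else (vals.count k.1 : Int) * (vals.count k.2 : Int)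
theorem nrm_eq_iff (a b c d : Int) :
    nrm a b = nrm c d ↔ (a = c ∧ b = d) ∨ (a = d ∧ b = c) := by
  unfold nrm; split_ifs <;> simp [Prod.ext_iff] <;> omega
theorem tri_succ (c : Int) :
    PySem.Int.floordiv ((c + 1) * c) 2 = PySem.Int.floordiv (c * (c - 1)) 2 + c := by
  obtain ⟨m, hm⟩ : ∃ m, c * (c - 1) = 2 * m := by
    rcases Int.even_or_odd c with ⟨k, hk⟩ | ⟨k, hk⟩
    · exact ⟨k * (c - 1), by rw [hk]; ring⟩
    · exact ⟨c * k, by rw [hk]; ring⟩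
  have h2 : (c + 1) * c = 2 * (m + c) := by nlinarith [hm]
  rw [hm, h2]
  simp [PySem.Int.floordiv, Int.mul_fdiv_cancel_left _ (by norm_num : (2:Int) ≠ 0)]
theorem countP_eq_count (t : List Int) (z : Int) :
    t.countP (fun w => decide (w = z)) = t.count z := by
  simp only [List.count]
  apply List.countP_congr
  intro w _
  simp

theorem countP_key (t : List Int) (v x y : Int) (hk : x ≤ y) :
    (t.countP (fun w => decide (nrm v w = (x, y))) : Int)
      = if v = x then (t.count y : Int) else if v = y then (t.count x : Int) else 0 := by
  have hnxy : (x, y) = nrm x y := by unfold nrm; rw [if_pos hk]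
  by_cases h1 : v = x
  · rw [if_pos h1, ← countP_eq_count]
    congr 1
    apply List.countP_congr
    intro w _
    simp only [decide_eq_true_eq]
    rw [hnxy, nrm_eq_iff]
    omega
  · rw [if_neg h1]
    by_cases h2 : v = y
    · rw [if_pos h2, ← countP_eq_count]
      congr 1
      apply List.countP_congr
      intro w _
      simp only [decide_eq_true_eq]
      rw [hnxy, nrm_eq_iff]
      omega
    · rw [if_neg h2, show t.countP (fun w => decide (nrm v w = (x, y))) = 0 from ?_]
      · simp
      rw [List.countP_eq_zero]
      intro w _
      simp only [decide_eq_true_eq]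
      rw [hnxy, nrm_eq_iff]
      omega

theorem wt_cons (v : Int) (t : List Int) (k : Int × Int) (hk : k.1 ≤ k.2) :
    wt (v :: t) k = wt t k + (t.countP (fun w => decide (nrm v w = k)) : Int) := by
  obtain ⟨x, y⟩ := k
  simp only at hk
  rw [countP_key t v x y hk]
  by_cases hxy : x = y
  · subst hxy
    simp only [wt]
    by_cases hv : v = x
    · subst hv
      rw [List.count_cons_self, if_pos rfl]
      push_cast
      rw [show ((t.count v : Int) + 1 - 1) = (t.count v : Int) by ring]
      rw [tri_succ (t.count v : Int)]
    · rw [List.count_cons_of_ne (by omega), if_neg hv, if_neg hv]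
      ring
  · simp only [wt, if_neg hxy]
    by_cases hvx : v = x
    · subst hvx
      rw [List.count_cons_self, List.count_cons_of_ne (by omega), if_pos rfl]
      push_cast; ring
    · by_cases hvy : v = y
      · subst hvy
        rw [List.count_cons_self, List.count_cons_of_ne (by omega), if_neg hvx, if_pos rfl]
        push_cast; ring
      · rw [List.count_cons_of_ne (by omega), List.count_cons_of_ne (by omega), if_neg hvx, if_neg hvy]
        ring

def cntPairs (K : List (Int × Int)) : List Int → Int
  | [] => 0
  | v :: t => (t.countP (fun w => decide (nrm v w ∈ K)) : Int) + cntPairs K t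

def collectNew (s : PySem.Set (Int × Int)) : List (Int × Int) → List (Int × Int)
  | [] => []
  | k :: r => if PySem.Set.contains s k then collectNew s r
              else k :: collectNew (PySem.Set.add s k) r

theorem wt_nil (k : Int × Int) : wt [] k = 0 := by
  unfold wt; split_ifs <;> simp [PySem.Int.floordiv]

theorem countP_or_disjoint (t : List Int) (p q : Int → Bool) (h : ∀ w, ¬(p w = true ∧ q w = true)) :
    t.countP (fun w => p w || q w) = t.countP p + t.countP q := by
  induction t with
  | nil => simp
  | cons w t iht =>
    simp only [List.countP_cons, iht]
    rcases hp : p w <;> rcases hq : q w <;> simp [hp, hq] <;> first | omega | exact absurd ⟨hp, hq⟩ (h w)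

theorem countP_mem_nodup (v : Int) (t : List Int) (L : List (Int × Int)) (hnd : L.Nodup) :
    ((L.map (fun k => (t.countP (fun w => decide (nrm v w = k)) : Int))).sum) =
      (t.countP (fun w => decide (nrm v w ∈ L)) : Int) := by
  induction L with
  | nil => simp
  | cons k L ih =>
    rcases List.nodup_cons.mp hnd with ⟨hk, hnd'⟩
    simp only [List.map_cons, List.sum_cons, ih hnd']
    have hcg : t.countP (fun w => decide (nrm v w ∈ k :: L))
        = t.countP (fun w => decide (nrm v w = k) || decide (nrm v w ∈ L)) := by
      apply List.countP_congr
      intro w _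
      simp [List.mem_cons]
    rw [hcg, countP_or_disjoint t _ _ (by
      intro w
      rintro ⟨h1, h2⟩
      simp only [decide_eq_true_eq] at h1 h2
      exact hk (h1 ▸ h2))]
    push_cast
    ring

theorem sum_map_add_pair (L : List (Int × Int)) (f g : Int × Int → Int) :
    (L.map (fun k => f k + g k)).sum = (L.map f).sum + (L.map g).sum := by
  induction L with
  | nil => simp
  | cons k L ih => simp only [List.map_cons, List.sum_cons, ih]; ring

theorem cntPairs_eq_sum (vals : List Int) (L : List (Int × Int)) (hnd : L.Nodup)
    (hnorm : ∀ k ∈ L, k.1 ≤ k.2) :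
    cntPairs L vals = (L.map (wt vals)).sum := by
  induction vals with
  | nil =>
    simp only [cntPairs]
    rw [List.sum_eq_zero]
    intro x hx
    rcases List.mem_map.mp hx with ⟨k, -, rfl⟩
    exact wt_nil k
  | cons v t ih =>
    simp only [cntPairs, ih]
    have hmap : L.map (wt (v :: t))
        = L.map (fun k => wt t k + (t.countP (fun w => decide (nrm v w = k)) : Int)) := by
      apply List.map_congr_left
      intro k hkL
      exact wt_cons v t k (hnorm k hkL)
    rw [hmap, sum_map_add_pair, countP_mem_nodup v t L hnd]
    ring

theorem cntPairs_congr (K L : List (Int × Int)) (h : ∀ x, x ∈ K ↔ x ∈ L) (vals : List Int) :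
    cntPairs K vals = cntPairs L vals := by
  induction vals with
  | nil => rfl
  | cons v t ih =>
    simp only [cntPairs, ih]
    congr 2
    apply List.countP_congr
    intro w _
    simp only [decide_eq_true_eq]
    exact h (nrm v w)

theorem mem_collectNew (K : List (Int × Int)) :
    ∀ s x, x ∈ collectNew s K ↔ x ∈ K ∧ ¬ x ∈ s := by
  induction K with
  | nil => simp [collectNew]
  | cons k r ih =>
    intro s x
    simp only [collectNew]
    by_cases hc : PySem.Set.contains s k = true
    · rw [if_pos hc, ih]
      have hk : k ∈ s := (PySem.Set.contains_iff s k).mp hc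
      simp only [List.mem_cons]
      constructor
      · rintro ⟨hx, hns⟩
        exact ⟨Or.inr hx, hns⟩
      · rintro ⟨(rfl | hx), hns⟩
        · exact absurd hk hns
        · exact ⟨hx, hns⟩
    · rw [if_neg hc]
      have hk : k ∉ s := fun h => hc ((PySem.Set.contains_iff s k).mpr h)
      simp only [List.mem_cons, ih]
      rw [PySem.Set.mem_add]
      constructor
      · rintro (rfl | ⟨hx, hns⟩)
        · exact ⟨Or.inl rfl, hk⟩
        · exact ⟨Or.inr hx, fun h => hns (Or.inl h)⟩
      · rintro ⟨(rfl | hx), hns⟩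
        · exact Or.inl rfl
        · by_cases hxk : x = k
          · exact Or.inl hxk
          · refine Or.inr ⟨hx, fun h => ?_⟩
            rcases h with h | h
            · exact hns h
            · exact hxk h

theorem nodup_collectNew (K : List (Int × Int)) :
    ∀ s, (collectNew s K).Nodup := by
  induction K with
  | nil => intro s; simp [collectNew]
  | cons k r ih =>
    intro s
    simp only [collectNew]
    by_cases hc : PySem.Set.contains s k = true
    · rw [if_pos hc]; exact ih s
    · rw [if_neg hc]
      refine List.nodup_cons.mpr ⟨?_, ih _⟩
      intro hmem
      rcases (mem_collectNew r _ k).mp hmem with ⟨-, hns⟩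
      exact hns (by rw [PySem.Set.mem_add]; exact Or.inr rfl)

def keyOf (p : List Int) : Int × Int :=
  nrm (PySem.List.pyGetD p 0 0) (PySem.List.pyGetD p 1 0)

theorem nrm_fst_le_snd (a b : Int) : (nrm a b).1 ≤ (nrm a b).2 := by
  unfold nrm
  by_cases h : a ≤ b
  · rw [if_pos h]; exact h
  · rw [if_neg h]; dsimp only; omega

theorem wt_body (vals : List Int) (x y : Int) :
    (if x = y then PySem.Int.floordiv ((vals.count x : Int) * ((vals.count x : Int) - 1)) 2
     else (vals.count x : Int) * (vals.count y : Int)) = wt vals (nrm x y) := by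
  unfold nrm
  by_cases hle : x ≤ y
  · rw [if_pos hle]
    unfold wt
    simp only
  · have hxy : ¬ x = y := by omega
    rw [if_neg hle]
    unfold wt
    dsimp only
    rw [if_neg hxy, if_neg (show ¬ (y = x) by omega)]
    ring

-- A raises nothing in the degenerate cases; both programs return 0
theorem solve_degenerate (Q : Int) (pairs : List (List Int)) (N : Int) (A : List Int)
    (h : N < 2 ∨ Q < 1) : solve Q pairs N A = 0 := by
  unfold solve
  rcases h with hN | hQ
  · by_cases hN0 : N ≤ 0
    · rw [PySem.List.pyRange_one_eq_nil hN0]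
      rfl
    · have hN1 : N = 1 := by omega
      subst hN1
      rw [show PySem.List.pyRange (0 : Int) 1 1 = [0] from by
        rw [PySem.List.pyRange_one_cons (by omega), PySem.List.pyRange_one_eq_nil (by omega)]]
      simp [PySem.List.pyRange_one_eq_nil]
  · simp only [PySem.List.pyRange_one_eq_nil (show Q ≤ (0 : Int) by omega), List.any_nil,
      Bool.false_eq_true, if_false, PySem.List.foldl_ignore]

theorem solve_alt_degenerate (Q : Int) (pairs : List (List Int)) (N : Int) (A : List Int)
    (h : N < 2 ∨ Q < 1) : solve_alt Q pairs N A = 0 := by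
  unfold solve_alt
  simp only
  rw [if_pos]
  simp only [Bool.or_eq_true, decide_eq_true_eq, beq_iff_eq]
  split_ifs <;> omega

theorem found_iff (Q : Int) (pairs : List (List Int)) (hQ0 : 0 ≤ Q)
    (hQp : Q ≤ (pairs.length : Int)) (a b : Int) :
    ((PySem.List.pyRange 0 Q 1).any (fun k =>
       let pk := PySem.List.pyGetD pairs k []
       (a == PySem.List.pyGetD pk 0 0 && b == PySem.List.pyGetD pk 1 0) ||
       (a == PySem.List.pyGetD pk 1 0 && b == PySem.List.pyGetD pk 0 0)))
    = decide (nrm a b ∈ (pairs.take Q.toNat).map keyOf) := by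
  by_cases hmem : nrm a b ∈ (pairs.take Q.toNat).map keyOf
  · rw [decide_eq_true hmem]
    rw [List.any_eq_true]
    rcases List.mem_map.mp hmem with ⟨p, hp, hkey⟩
    rcases List.mem_iff_getElem.mp hp with ⟨i, hilt, hget⟩
    have hitake : i < Q.toNat := by
      have := hilt
      simp [List.length_take] at this
      omega
    have hilen : i < pairs.length := by
      have := hilt
      simp [List.length_take] at this
      omega
    have hpi : pairs[i] = p := by
      rw [← hget]
      exact (List.getElem_take ..).symm
    refine ⟨(i : Int), ?_, ?_⟩
    · rw [PySem.List.mem_pyRange_one]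
      constructor
      · exact Int.natCast_nonneg i
      · omega
    · have hpk : PySem.List.pyGetD pairs (i : Int) [] = p := by
        rw [PySem.List.pyGetD_natCast]
        rw [List.getD_eq_getElem _ _ hilen]
        exact hpi
      simp only [hpk, Bool.or_eq_true, Bool.and_eq_true, beq_iff_eq]
      have := (nrm_eq_iff a b (PySem.List.pyGetD p 0 0) (PySem.List.pyGetD p 1 0)).mp hkey.symm
      unfold keyOf at hkey
      exact this
  · rw [decide_eq_false hmem]
    rw [List.any_eq_false]
    intro k hk
    rw [PySem.List.mem_pyRange_one] at hk
    simp only [Bool.or_eq_true, Bool.and_eq_true, beq_iff_eq, not_or, not_and]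
    have hklen : k.toNat < pairs.length := by omega
    have hpk : PySem.List.pyGetD pairs k [] = pairs[k.toNat] :=
      PySem.List.pyGetD_eq_getElem pairs [] hk.1 (by omega)
    have hmm : ∀ (h : nrm a b = keyOf pairs[k.toNat]), False := by
      intro h
      apply hmem
      rw [h]
      apply List.mem_map_of_mem
      rw [List.mem_take_iff_getElem]
      exact ⟨k.toNat, by simp; omega, rfl⟩
    constructor
    · intro h1 h2
      exact hmm (by
        unfold keyOf
        rw [← hpk, nrm_eq_iff]
        exact Or.inl ⟨h1, h2⟩)
    · intro h1 h2
      exact hmm (by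
        unfold keyOf
        rw [← hpk, nrm_eq_iff]
        exact Or.inr ⟨h1, h2⟩)

theorem outerLem (Q : Int) (pairs : List (List Int)) (A vals : List Int) (K : List (Int × Int))
    (hav : ∀ j : Int, 0 ≤ j → j < (vals.length : Int) →
      PySem.List.pyGetD A j 0 = PySem.List.pyGetD vals j 0)
    (hfound : ∀ a b : Int, ((PySem.List.pyRange 0 Q 1).any (fun k =>
       let pk := PySem.List.pyGetD pairs k []
       (a == PySem.List.pyGetD pk 0 0 && b == PySem.List.pyGetD pk 1 0) ||
       (a == PySem.List.pyGetD pk 1 0 && b == PySem.List.pyGetD pk 0 0)))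
       = decide (nrm a b ∈ K)) :
    ∀ (u : List Int) (i : ℕ) (c : Int), vals.drop i = u →
      (PySem.List.pyRange (i : Int) ((vals.length : Int)) 1).foldl (fun count i =>
        (PySem.List.pyRange (i + 1) ((vals.length : Int)) 1).foldl (fun count j =>
          if (PySem.List.pyRange 0 Q 1).any (fun k =>
               let pk := PySem.List.pyGetD pairs k []
               (PySem.List.pyGetD A i 0 == PySem.List.pyGetD pk 0 0 &&
                PySem.List.pyGetD A j 0 == PySem.List.pyGetD pk 1 0) ||
               (PySem.List.pyGetD A i 0 == PySem.List.pyGetD pk 1 0 &&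
                PySem.List.pyGetD A j 0 == PySem.List.pyGetD pk 0 0))
          then count + 1 else count) count) c
      = c + cntPairs K u := by
  intro u
  induction u with
  | nil =>
    intro i c hdrop
    have hlen : vals.length ≤ i := by
      by_contra hlt
      rw [not_le] at hlt
      have := List.drop_eq_nil_iff.mp hdrop
      omega
    rw [PySem.List.pyRange_one_eq_nil (a := (i : Int)) (b := (vals.length : Int)) (by exact_mod_cast hlen)]
    simp [cntPairs]
  | cons v t ih =>
    intro i c hdrop
    have hi : i < vals.length := by
      by_contra hge
      rw [not_lt] at hge
      rw [List.drop_eq_nil_iff.mpr hge] at hdrop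
      simp at hdrop
    have hvi : vals[i] = v := by
      have h0 : (vals.drop i)[0]'(by rw [hdrop]; simp) = v := by
        simp [hdrop]
      rw [List.getElem_drop] at h0
      simpa using h0
    rw [PySem.List.pyRange_one_cons (a := (i : Int)) (b := (vals.length : Int)) (by exact_mod_cast hi), List.foldl_cons]
    have hAi : PySem.List.pyGetD A (i : Int) 0 = v := by
      rw [hav (i : Int) (Int.natCast_nonneg i) (by exact_mod_cast hi)]
      rw [PySem.List.pyGetD_eq_getElem vals 0 (Int.natCast_nonneg i) (by exact_mod_cast hi)]
      simpa using hvi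
    have hrow : ∀ c0 : Int,
        (PySem.List.pyRange ((i : Int) + 1) ((vals.length : Int)) 1).foldl (fun count j =>
          if (PySem.List.pyRange 0 Q 1).any (fun k =>
               let pk := PySem.List.pyGetD pairs k []
               (PySem.List.pyGetD A (i : Int) 0 == PySem.List.pyGetD pk 0 0 &&
                PySem.List.pyGetD A j 0 == PySem.List.pyGetD pk 1 0) ||
               (PySem.List.pyGetD A (i : Int) 0 == PySem.List.pyGetD pk 1 0 &&
                PySem.List.pyGetD A j 0 == PySem.List.pyGetD pk 0 0))
          then count + 1 else count) c0
        = c0 + (t.countP (fun w => decide (nrm v w ∈ K)) : Int) := by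
      intro c0
      rw [PySem.List.foldl_congr_mem _ _
        (fun count j => if decide (nrm v (PySem.List.pyGetD vals j 0) ∈ K) then count + 1 else count)
        c0 ?_]
      · have := PySem.List.foldl_pyRange_pyGetD' vals 0
          (fun count w => if decide (nrm v w ∈ K) then count + 1 else count) c0
          (a := (i : Int) + 1) (by omega)
        rw [this]
        have hdt : vals.drop ((i : Int) + 1).toNat = t := by
          have : ((i : Int) + 1).toNat = i + 1 := by omega
          rw [this]
          rw [← List.drop_drop, hdrop]
          rfl
        rw [hdt]
        exact PySem.List.foldl_if_add_one _ t c0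
      · intro acc j hj
        rw [PySem.List.mem_pyRange_one] at hj
        rw [hAi, hav j (by omega) hj.2, hfound v (PySem.List.pyGetD vals j 0)]
    rw [hrow c]
    have hcast : (i : Int) + 1 = ((i + 1 : ℕ) : Int) := by push_cast; ring
    rw [hcast, ih (i + 1) _ (by
      rw [← List.drop_drop, hdrop]
      rfl)]
    simp only [cntPairs]
    ring

theorem solve_main (Q : Int) (pairs : List (List Int)) (N : Int) (A : List Int)
    (hN2 : 2 ≤ N) (hQ1 : 1 ≤ Q) (hNA : N ≤ (A.length : Int)) (hQp : Q ≤ (pairs.length : Int)) :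
    solve Q pairs N A = cntPairs ((pairs.take Q.toNat).map keyOf) (A.take N.toNat) := by
  unfold solve
  set vals := A.take N.toNat with hvals
  have hlenv : vals.length = N.toNat := by
    rw [hvals, List.length_take]
    omega
  have hNcast : N = (vals.length : Int) := by rw [hlenv]; omega
  rw [hNcast]
  have hav : ∀ j : Int, 0 ≤ j → j < (vals.length : Int) →
      PySem.List.pyGetD A j 0 = PySem.List.pyGetD vals j 0 := by
    intro j hj0 hjl
    have hjA : j < (A.length : Int) := by
      rw [hlenv] at hjl
      omega
    rw [PySem.List.pyGetD_eq_getElem A 0 hj0 hjA,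
        PySem.List.pyGetD_eq_getElem vals 0 hj0 hjl]
    simp only [hvals, List.getElem_take]
  have h := outerLem Q pairs A vals ((pairs.take Q.toNat).map keyOf) hav
    (found_iff Q pairs (by omega) hQp) vals 0 0 (by simp)
  simpa using h

theorem bfoldLem (vals : List Int) :
    ∀ (K : List (Int × Int)) (s : PySem.Set (Int × Int)) (t : Int),
      (K.foldl (fun (st : PySem.Set (Int × Int) × Int) k =>
          if PySem.Set.contains st.1 k then st
          else (PySem.Set.add st.1 k, st.2 + wt vals k)) (s, t)).2
      = t + ((collectNew s K).map (wt vals)).sum := by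
  intro K
  induction K with
  | nil => intro s t; simp [collectNew]
  | cons k r ih =>
    intro s t
    simp only [List.foldl_cons, collectNew]
    by_cases hc : PySem.Set.contains s k = true
    · rw [if_pos hc, if_pos hc, ih]
    · rw [if_neg hc, if_neg hc, ih]
      simp only [List.map_cons, List.sum_cons]
      ring

theorem solve_alt_main (Q : Int) (pairs : List (List Int)) (N : Int) (A : List Int)
    (hN2 : 2 ≤ N) (hQ1 : 1 ≤ Q) :
    solve_alt Q pairs N A
      = ((collectNew PySem.Set.empty ((pairs.take Q.toNat).map keyOf)).map
          (wt (A.take N.toNat))).sum := by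
  unfold solve_alt
  dsimp only
  rw [if_pos (show N > 0 by omega), if_pos (show Q > 0 by omega)]
  rw [if_neg (by
    simp only [Bool.or_eq_true, decide_eq_true_eq, beq_iff_eq]
    omega)]
  rw [PySem.List.slice_to A (by omega), PySem.List.slice_to pairs (by omega)]
  rw [PySem.Dict.foldl_insert_getD_add_one_eq_counter]
  set vals := A.take N.toNat with hvals
  have hbody : (fun (st : PySem.Set (Int × Int) × Int) (p : List Int) =>
      let x := PySem.List.pyGetD p 0 0
      let y := PySem.List.pyGetD p 1 0
      let key := if x ≤ y then (x, y) else (y, x)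
      if PySem.Set.contains st.1 key then st
      else (PySem.Set.add st.1 key,
            st.2 + (if x = y then
                      let c := (PySem.Dict.counter vals).getD x 0
                      PySem.Int.floordiv (c * (c - 1)) 2
                    else (PySem.Dict.counter vals).getD x 0 * (PySem.Dict.counter vals).getD y 0)))
      = (fun (st : PySem.Set (Int × Int) × Int) (p : List Int) =>
          if PySem.Set.contains st.1 (keyOf p) then st
          else (PySem.Set.add st.1 (keyOf p), st.2 + wt vals (keyOf p))) := by
    funext st p
    dsimp only
    simp only [PySem.Dict.getD_counter]
    rw [wt_body vals (PySem.List.pyGetD p 0 0) (PySem.List.pyGetD p 1 0)]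
    rfl
  rw [hbody, ← List.foldl_map (f := keyOf)
    (g := fun (st : PySem.Set (Int × Int) × Int) (k : Int × Int) =>
      if PySem.Set.contains st.1 k then st
      else (PySem.Set.add st.1 k, st.2 + wt vals k))]
  rw [bfoldLem vals ((pairs.take Q.toNat).map keyOf) PySem.Set.empty 0]
  ring

theorem solve_spec : Claim_equal_solve := by
  unfold Claim_equal_solve
  intro Q pairs N A _ hPre
  unfold Spec_solve
  by_cases hmain : 2 ≤ N ∧ 1 ≤ Q
  · obtain ⟨hN2, hQ1⟩ := hmain
    obtain ⟨hNA, hQp, -⟩ := hPre ⟨hN2, hQ1⟩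
    rw [solve_main Q pairs N A hN2 hQ1 hNA hQp, solve_alt_main Q pairs N A hN2 hQ1]
    set K := (pairs.take Q.toNat).map keyOf with hK
    set vals := A.take N.toNat with hvals
    set L := collectNew PySem.Set.empty K with hL
    have hmem : ∀ x, x ∈ K ↔ x ∈ L := by
      intro x
      rw [hL, mem_collectNew]
      constructor
      · intro h; exact ⟨h, by simp [PySem.Set.empty]⟩
      · rintro ⟨h, -⟩; exact h
    have hnorm : ∀ k ∈ L, k.1 ≤ k.2 := by
      intro k hk
      rcases (mem_collectNew K PySem.Set.empty k).mp hk with ⟨hkK, -⟩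
      rcases List.mem_map.mp hkK with ⟨p, -, rfl⟩
      exact nrm_fst_le_snd _ _
    rw [cntPairs_congr K L hmem vals, cntPairs_eq_sum vals L (nodup_collectNew K _) hnorm]
  · have h : N < 2 ∨ Q < 1 := by omega
    rw [solve_degenerate Q pairs N A h, solve_alt_degenerate Q pairs N A h]
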